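-- pv_equiv track=rewrite | github.com/ptrajano/vigenere | cifra_de_Vigenere.py | encontrar_distancias_entre_substrings
-- ===== SOURCE A (Python) =====
-- def encontrar_distancias_entre_substrings(vetor):
--     ocorrencias = {}
--     distancias = []
--
--     for indice, substring in enumerate(vetor):
--         if substring in ocorrencias:
--             val = indice - ocorrencias[substring]
--             if val not in distancias:
--                 distancias.append(val)
--         ocorrencias[substring] = indice
--
--     return distancias
-- ===== SOURCE B (Python) =====
-- def encontrar_distancias_entre_substrings(vetor):
--     # Alternative: no dict — for each position scan backwards for the previous
--     # equal element; collect each new distance in first-encounter order.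
--     distancias = []
--     for i in range(len(vetor)):
--         for j in range(i - 1, -1, -1):
--             if vetor[j] == vetor[i]:
--                 d = i - j
--                 if d not in distancias:
--                     distancias.append(d)
--                 break
--     return distancias
-- ===== Notes on version B (the rewrite author's own statement) =====
-- stated objective: alternative
-- what changed: B drops the last-occurrence dictionary entirely and instead, for each position, scans backwards to find the previous equal element, collecting each new distance in first-encounter order.
import Mathlib
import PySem

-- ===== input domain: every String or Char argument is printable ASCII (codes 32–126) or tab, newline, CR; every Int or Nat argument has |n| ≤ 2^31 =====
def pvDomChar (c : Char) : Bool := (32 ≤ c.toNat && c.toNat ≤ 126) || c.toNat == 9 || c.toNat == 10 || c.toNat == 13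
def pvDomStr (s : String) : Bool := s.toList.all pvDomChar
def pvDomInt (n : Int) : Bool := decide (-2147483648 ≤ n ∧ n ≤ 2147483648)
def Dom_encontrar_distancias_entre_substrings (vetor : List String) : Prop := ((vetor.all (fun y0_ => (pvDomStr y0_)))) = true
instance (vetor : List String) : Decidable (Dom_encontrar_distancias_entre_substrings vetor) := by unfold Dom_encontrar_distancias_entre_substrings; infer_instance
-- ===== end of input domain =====

-- B replaces A's last-occurrence dictionary by a per-position backward scan (alternative decomposition, same cost class).

-- ===== PORT A =====
-- loop body of A: dict of last occurrences + list of distances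
def pvStepA (st : PySem.Dict String Int × List Int) (p : Int × String) :
    PySem.Dict String Int × List Int :=
  let ds := match st.1.get? p.2 with
    | some prev =>
        let v := p.1 - prev
        if v ∈ st.2 then st.2 else st.2 ++ [v]
    | none => st.2
  (st.1.insert p.2 p.1, ds)

def encontrar_distancias_entre_substrings (vetor : List String) : List Int :=
  ((PySem.List.enumerate vetor).foldl pvStepA (PySem.Dict.empty, [])).2

-- ===== PORT B =====
-- inner loop of B: for j in range(i-1, -1, -1): … break  (some j = break with match at j)
def pvScanBack (vetor : List String) (s : String) : Nat → Option Nat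
  | 0 => none
  | j + 1 => if vetor.getD j "" = s then some j else pvScanBack vetor s j

-- outer loop body of B
def pvStepB (vetor : List String) (ds : List Int) (i : Nat) : List Int :=
  match pvScanBack vetor (vetor.getD i "") i with
  | some j =>
      let d : Int := (i : Int) - (j : Int)
      if d ∈ ds then ds else ds ++ [d]
  | none => ds

def encontrar_distancias_entre_substrings_alt (vetor : List String) : List Int :=
  (List.range vetor.length).foldl (pvStepB vetor) []

-- ===== PRECONDITION & SPEC =====
def Spec_encontrar_distancias_entre_substrings (vetor : List String) (out : List Int) : Prop := out = encontrar_distancias_entre_substrings_alt vetor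
instance (vetor : List String) (out : List Int) : Decidable (Spec_encontrar_distancias_entre_substrings vetor out) := by unfold Spec_encontrar_distancias_entre_substrings; infer_instance

-- ===== CLAIM (what is proved, stated in full; the proofs are below) =====
def Claim_equal_encontrar_distancias_entre_substrings : Prop := ∀ (vetor : List String), Dom_encontrar_distancias_entre_substrings vetor → Spec_encontrar_distancias_entre_substrings vetor (encontrar_distancias_entre_substrings vetor)

-- ===== LEMMAS AND PROOFS =====

-- Invariant: after processing the first n elements, A's dict maps s to the
-- last index of s below n (= what B's backward scan from n finds), and the
-- two distance lists agree.
theorem pv_invariant (vetor : List String) (n : Nat) (hn : n ≤ vetor.length) :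
    (∀ s : String,
      (((PySem.List.enumerate vetor).take n).foldl pvStepA (PySem.Dict.empty, [])).1.get? s
        = (pvScanBack vetor s n).map (fun j => (j : Int)))
    ∧ (((PySem.List.enumerate vetor).take n).foldl pvStepA (PySem.Dict.empty, [])).2
        = (List.range n).foldl (pvStepB vetor) [] := by
  induction n with
  | zero => simp [pvScanBack]
  | succ n ih =>
    have hlt : n < vetor.length := hn
    obtain ⟨ih1, ih2⟩ := ih (Nat.le_of_lt hlt)
    have htake : ((PySem.List.enumerate vetor).take (n + 1))
        = ((PySem.List.enumerate vetor).take n) ++ [((n : Int), vetor[n])] := by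
      rw [List.take_add_one]
      have : (PySem.List.enumerate vetor)[n]? = some ((n : Int), vetor[n]) := by
        rw [List.getElem?_eq_getElem (by simpa [PySem.List.length_enumerate] using hlt)]
        simp [PySem.List.getElem_enumerate]
      simp [this]
    have hgetD : vetor[n]? = some vetor[n] := List.getElem?_eq_getElem hlt
    rw [htake, List.foldl_append, List.range_succ, List.foldl_append]
    set stA := ((PySem.List.enumerate vetor).take n).foldl pvStepA (PySem.Dict.empty, []) with hst
    constructor
    · intro s
      show (stA.1.insert (vetor[n]) (n : Int)).get? s = _
      rw [PySem.Dict.get?_insert]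
      by_cases h : s = vetor[n]
      · simp [pvScanBack, hgetD, h]
      · simp only [pvScanBack, List.getD, hgetD, Option.getD_some]
        rw [if_neg (mt Eq.symm h), if_neg h]
        exact ih1 s
    · show (pvStepA stA ((n : Int), vetor[n])).2 = pvStepB vetor ((List.range n).foldl (pvStepB vetor) []) n
      rw [← ih2]
      unfold pvStepA pvStepB
      simp only [List.getD, hgetD, Option.getD_some]
      rw [ih1 (vetor[n])]
      cases pvScanBack vetor (vetor[n]) n with
      | none => rfl
      | some j => rfl

-- ===== VERDICT (by name: the statement is the Claim_ definition above) =====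
theorem encontrar_distancias_entre_substrings_spec : Claim_equal_encontrar_distancias_entre_substrings := by
  intro vetor _
  show encontrar_distancias_entre_substrings vetor = encontrar_distancias_entre_substrings_alt vetor
  have h := (pv_invariant vetor vetor.length (le_refl _)).2
  unfold encontrar_distancias_entre_substrings encontrar_distancias_entre_substrings_alt
  rw [← h, List.take_of_length_le (by simp [PySem.List.length_enumerate])]
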